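-- pv_equiv track=rewrite | github.com/mfaramarzi/Internship_Summer2021 | david/Generators/CourseScheduling/course_scheduling_generator.py | solve
-- ===== SOURCE A (Python) =====
-- def solve(fnames, lnames, courses):
--   outStr = ""
--   courseMap = {}
--   for c in courses:
--     courseMap[c] = 0
--
--   used = []
--
--   for f, l, c in zip(fnames, lnames, courses):
--     if (f,l,c) not in used:
--       used.append((f,l,c))
--       courseMap[c] += 1
--
--   for course in sorted(courseMap.keys()):
--     outStr += course + " " + str(courseMap[course]) + "\n"
--
--   return outStr
-- ===== SOURCE B (Python) =====
-- def solve(fnames, lnames, courses):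
--     # No dedup list and no counter dict: for each course (sorted, distinct),
--     # independently collect the distinct (first, last) name pairs enrolled in
--     # that course and print how many there are.
--     rows = list(zip(fnames, lnames, courses))
--     out = []
--     for course in sorted(set(courses)):
--         names = {(f, l) for (f, l, c) in rows if c == course}
--         out.append(course + " " + str(len(names)) + "\n")
--     return "".join(out)
-- ===== Notes on version B (the rewrite author's own statement) =====
-- stated objective: alternative
-- what changed: A's single incremental loop maintaining a growing dedup list plus a counter dict is replaced by a per-course computation: for each sorted distinct course, B independently builds the set of distinct (first,last) pairs filtered to that course and prints its size; no global dedup structure and no counter exist.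
import Mathlib
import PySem

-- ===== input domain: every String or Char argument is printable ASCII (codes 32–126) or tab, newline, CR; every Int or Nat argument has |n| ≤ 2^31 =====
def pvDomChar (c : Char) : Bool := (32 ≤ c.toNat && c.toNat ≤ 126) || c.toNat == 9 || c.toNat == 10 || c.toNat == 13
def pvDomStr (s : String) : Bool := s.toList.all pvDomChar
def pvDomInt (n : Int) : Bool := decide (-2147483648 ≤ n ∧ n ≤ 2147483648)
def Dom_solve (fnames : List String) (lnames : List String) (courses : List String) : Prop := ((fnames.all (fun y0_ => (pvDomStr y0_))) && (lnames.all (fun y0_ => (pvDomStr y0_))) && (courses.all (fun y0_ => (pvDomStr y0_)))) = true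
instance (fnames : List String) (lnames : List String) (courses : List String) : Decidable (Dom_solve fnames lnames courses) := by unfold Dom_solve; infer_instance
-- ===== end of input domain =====

-- B drops A's global dedup list and counter dict entirely: for each sorted distinct
-- course it independently builds the set of distinct (first,last) pairs filtered to
-- that course and prints its size; objective: alternative decomposition (not faster).

-- ===== PORT A =====
def solve (fnames : List String) (lnames : List String) (courses : List String) : String :=
  let courseMap : PySem.Dict String Int :=
    courses.foldl (fun d c => d.insert c 0) PySem.Dict.empty
  -- `courseMap[c] += 1`: c always comes from `courses`, so it is a key of courseMap
  -- and the KeyError branch of Python's d[c] is unreachable; `modify c 0 (· + 1)` is exact here.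
  let st :=
    (fnames.zip (lnames.zip courses)).foldl
      (fun (st : List (String × String × String) × PySem.Dict String Int) t =>
        if t ∈ st.1 then st
        else (st.1 ++ [t], st.2.modify t.2.2 0 (· + 1)))
      ([], courseMap)
  (PySem.List.sorted st.2.keys (fun x => x) false).foldl
    (fun out course => out ++ course ++ " " ++ PySem.Int.toStr (st.2.getD course 0) ++ "\n") ""

-- ===== PORT B =====
def solve_alt (fnames : List String) (lnames : List String) (courses : List String) : String :=
  let rows := fnames.zip (lnames.zip courses)
  let out : List String :=
    (PySem.List.sorted (PySem.Set.ofList courses) (fun x => x) false).foldl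
      (fun acc course =>
        acc ++ [course ++ " " ++
          PySem.Int.toStr
            ((PySem.Set.ofList
                ((rows.filter (fun t => t.2.2 == course)).map (fun t => (t.1, t.2.1)))).length : Int)
          ++ "\n"]) []
  PySem.Str.join "" out

-- ===== PRECONDITION & SPEC =====
def Spec_solve (fnames : List String) (lnames : List String) (courses : List String) (out : String) : Prop := out = solve_alt fnames lnames courses
instance (fnames : List String) (lnames : List String) (courses : List String) (out : String) : Decidable (Spec_solve fnames lnames courses out) := by unfold Spec_solve; infer_instance

-- ===== CLAIM (what is proved, stated in full; the proofs are below) =====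
def Claim_equal_solve : Prop := ∀ (fnames : List String) (lnames : List String) (courses : List String), Dom_solve fnames lnames courses → Spec_solve fnames lnames courses (solve fnames lnames courses)

-- ===== LEMMAS AND PROOFS =====

-- The fresh (not-yet-seen) triples A's dedup loop appends to `used`, in order.
def pvFresh (u : List (String × String × String)) :
    List (String × String × String) → List (String × String × String)
  | [] => []
  | t :: ts => if t ∈ u then pvFresh u ts else t :: pvFresh (u ++ [t]) ts

-- A's dedup-and-count loop, characterised: `used` becomes u ++ pvFresh u ts and the
-- dict is modified once per fresh triple.
lemma loopA_eq (ts : List (String × String × String)) :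
    ∀ (u : List (String × String × String)) (d : PySem.Dict String Int),
    ts.foldl (fun (st : List (String × String × String) × PySem.Dict String Int) t =>
        if t ∈ st.1 then st
        else (st.1 ++ [t], st.2.modify t.2.2 0 (· + 1))) (u, d)
    = (u ++ pvFresh u ts,
       (pvFresh u ts).foldl (fun d t => d.modify t.2.2 0 (· + 1)) d) := by
  induction ts with
  | nil => intro u d; simp [pvFresh]
  | cons t ts ih =>
    intro u d
    by_cases h : t ∈ u
    · simp [pvFresh, h, ih]
    · simp [pvFresh, h, ih]

lemma append_pvFresh (ts : List (String × String × String)) :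
    ∀ (u : List (String × String × String)),
    u ++ pvFresh u ts = PySem.Set.update u ts := by
  induction ts with
  | nil => intro u; simp [pvFresh, PySem.Set.update]
  | cons t ts ih =>
    intro u
    by_cases h : t ∈ u
    · simp only [pvFresh, if_pos h, PySem.Set.update, List.foldl_cons]
      have hadd : PySem.Set.add u t = u := by
        simp [PySem.Set.add, PySem.Set.contains, h]
      rw [hadd]
      simpa [PySem.Set.update] using ih u
    · simp only [pvFresh, if_neg h, PySem.Set.update, List.foldl_cons]
      have hadd : PySem.Set.add u t = u ++ [t] := by
        simp [PySem.Set.add, PySem.Set.contains, h]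
      rw [hadd]
      simpa [PySem.Set.update, List.append_assoc] using ih (u ++ [t])

lemma pvFresh_nil (ts : List (String × String × String)) :
    pvFresh [] ts = PySem.Set.ofList ts := by
  simpa using append_pvFresh ts []

lemma getD_foldl_insert_zero (cs : List String) :
    ∀ (d : PySem.Dict String Int) (x : String), d.getD x 0 = 0 →
    (cs.foldl (fun d c => d.insert c (0 : Int)) d).getD x 0 = 0 := by
  induction cs with
  | nil => intro d x h; simpa using h
  | cons c cs ih =>
    intro d x h
    refine ih _ x ?_
    by_cases hx : x = c
    · subst hx; simp [PySem.Dict.getD_insert_self]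
    · rw [PySem.Dict.getD_insert_of_ne _ _ _ hx]; exact h

lemma set_update_self (xs : List String) :
    ∀ (s : PySem.Set String), (∀ x ∈ xs, x ∈ s) → PySem.Set.update s xs = s := by
  induction xs with
  | nil => intro s _; rfl
  | cons x xs ih =>
    intro s h
    have hx : x ∈ s := h x (by simp)
    have hadd : PySem.Set.add s x = s := by
      simp [PySem.Set.add, PySem.Set.contains, hx]
    simp only [PySem.Set.update, List.foldl_cons, hadd]
    simpa [PySem.Set.update] using ih s (fun y hy => h y (by simp [hy]))

lemma join_empty_cons (p : String) (l : List String) :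
    PySem.Str.join "" (p :: l) = p ++ PySem.Str.join "" l := by
  apply String.ext
  cases l with
  | nil => simp [PySem.Str.toList_join, PySem.Chars.join_singleton, PySem.Chars.join_nil]
  | cons q r => simp [PySem.Str.toList_join, PySem.Chars.join_cons_cons]

lemma foldl_append_eq_join (l : List String) (g : String → String) :
    ∀ (s : String), l.foldl (fun out c => out ++ g c) s = s ++ PySem.Str.join "" (l.map g) := by
  induction l with
  | nil => intro s; apply String.ext; simp [PySem.Str.toList_join, PySem.Chars.join_nil]
  | cons c l ih =>
    intro s
    simp only [List.foldl_cons, List.map_cons]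
    rw [ih, join_empty_cons]
    apply String.ext; simp

-- keyed form of the counting-loop lemma, from the library lemma via List.foldl_map
lemma getD_modify_keyed (l : List (String × String × String)) (d : PySem.Dict String Int) (c : String) :
    (l.foldl (fun d t => d.modify t.2.2 0 (· + 1)) d).getD c 0
    = d.getD c 0 + ((l.map (fun t => t.2.2)).count c : Int) := by
  have h1 := PySem.Dict.getD_foldl_modify_add_one (l.map (fun t => t.2.2)) d c
  rw [List.foldl_map] at h1
  exact h1

lemma count_map_eq (c : String) (l : List (String × String × String)) :
    (l.map (fun t => t.2.2)).count c = (l.filter (fun t => t.2.2 == c)).length := by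
  induction l with
  | nil => simp
  | cons t l ih => by_cases h : t.2.2 = c <;> simp [h, ih]

-- CRUX: filtering the (first-occurrence) dedup of the rows to one course and
-- projecting to the name pair equals the dedup of the filtered, projected rows —
-- because (pair, course) determines the triple.
lemma set_filter_map (c : String) (ts : List (String × String × String)) :
    ∀ (u : List (String × String × String)),
    ((ts.foldl PySem.Set.add u).filter (fun t => t.2.2 == c)).map (fun t => (t.1, t.2.1))
    = ((ts.filter (fun t => t.2.2 == c)).map (fun t => (t.1, t.2.1))).foldl PySem.Set.add
        ((u.filter (fun t => t.2.2 == c)).map (fun t => (t.1, t.2.1))) := by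
  induction ts with
  | nil => intro u; simp
  | cons t ts ih =>
    intro u
    by_cases hmem : t ∈ u
    · have hadd : PySem.Set.add u t = u := by
        simp [PySem.Set.add, PySem.Set.contains, hmem]
      by_cases hc : t.2.2 = c
      · have hp : (t.1, t.2.1) ∈ (u.filter (fun t => t.2.2 == c)).map (fun t => (t.1, t.2.1)) := by
          exact List.mem_map.mpr ⟨t, List.mem_filter.mpr ⟨hmem, by simp [hc]⟩, rfl⟩
        have haddp : PySem.Set.add ((u.filter (fun t => t.2.2 == c)).map (fun t => (t.1, t.2.1)))
            (t.1, t.2.1) = (u.filter (fun t => t.2.2 == c)).map (fun t => (t.1, t.2.1)) := by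
          simp [PySem.Set.add, PySem.Set.contains, hp]
        simp only [List.foldl_cons, hadd, List.filter_cons, hc]
        simp only [beq_self_eq_true, if_pos, List.map_cons, List.foldl_cons, haddp]
        exact ih u
      · simp only [List.foldl_cons, hadd, List.filter_cons]
        simp only [show (t.2.2 == c) = false by simp [hc], if_neg, Bool.false_eq_true,
          not_false_iff]
        exact ih u
    · have hadd : PySem.Set.add u t = u ++ [t] := by
        simp [PySem.Set.add, PySem.Set.contains, hmem]
      by_cases hc : t.2.2 = c
      · have hp : (t.1, t.2.1) ∉ (u.filter (fun t => t.2.2 == c)).map (fun t => (t.1, t.2.1)) := by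
          intro h
          obtain ⟨t', ht', hpt⟩ := List.mem_map.mp h
          obtain ⟨ht'u, ht'c⟩ := List.mem_filter.mp ht'
          have hc' : t'.2.2 = c := by simpa using ht'c
          have : t' = t := by
            obtain ⟨f, l, d⟩ := t
            obtain ⟨f', l', d'⟩ := t'
            simp only [Prod.mk.injEq] at hpt ⊢
            exact ⟨hpt.1, hpt.2, by simp only at hc' hc; rw [hc', hc]⟩
          exact hmem (this ▸ ht'u)
        have haddp : PySem.Set.add ((u.filter (fun t => t.2.2 == c)).map (fun t => (t.1, t.2.1)))
            (t.1, t.2.1)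
            = (u.filter (fun t => t.2.2 == c)).map (fun t => (t.1, t.2.1)) ++ [(t.1, t.2.1)] := by
          simp [PySem.Set.add, PySem.Set.contains, hp]
        simp only [List.foldl_cons, hadd, List.filter_cons, hc]
        simp only [beq_self_eq_true, if_pos, List.map_cons, List.foldl_cons, haddp]
        have := ih (u ++ [t])
        rw [this]
        congr 1
        simp [List.filter_append, hc]
      · simp only [List.foldl_cons, hadd, List.filter_cons]
        simp only [show (t.2.2 == c) = false by simp [hc], if_neg, Bool.false_eq_true,
          not_false_iff]
        have := ih (u ++ [t])
        rw [this]
        congr 2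
        simp [List.filter_append, show (t.2.2 == c) = false by simp [hc]]

-- Counts agree: A's per-course count over the deduped triples equals the size of
-- B's set of distinct name pairs filtered to that course.
lemma count_eq_len (c : String) (ts : List (String × String × String)) :
    (((PySem.Set.ofList ts).map (fun t => t.2.2)).count c : Nat)
    = (PySem.Set.ofList ((ts.filter (fun t => t.2.2 == c)).map (fun t => (t.1, t.2.1)))).length := by
  have hof : PySem.Set.ofList ts = ts.foldl PySem.Set.add [] := PySem.Set.ofList_eq_foldl ts
  have hof2 : PySem.Set.ofList ((ts.filter (fun t => t.2.2 == c)).map (fun t => (t.1, t.2.1)))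
      = ((ts.filter (fun t => t.2.2 == c)).map (fun t => (t.1, t.2.1))).foldl PySem.Set.add [] :=
    PySem.Set.ofList_eq_foldl _
  have hM := set_filter_map c ts []
  simp only [List.filter_nil, List.map_nil] at hM
  rw [hof2, ← hM, ← hof, List.length_map, count_map_eq]

-- ===== VERDICT (by name: the statement is the Claim_ definition above) =====
theorem solve_spec : Claim_equal_solve := by
  unfold Claim_equal_solve
  intro fnames lnames courses _
  unfold Spec_solve solve solve_alt
  simp only []
  set trips := fnames.zip (lnames.zip courses) with htrips
  set d0 : PySem.Dict String Int :=
    courses.foldl (fun d c => d.insert c 0) PySem.Dict.empty with hd0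
  rw [loopA_eq, pvFresh_nil]
  set uniq := PySem.Set.ofList trips with huniq
  set dA : PySem.Dict String Int :=
    uniq.foldl (fun d t => d.modify t.2.2 0 (· + 1)) d0 with hdA
  -- keys of A's dict = set(courses)
  have hmem : ∀ x ∈ uniq.map (fun t => t.2.2), x ∈ PySem.Set.ofList courses := by
    intro x hx
    obtain ⟨t, ht, rfl⟩ := List.mem_map.mp hx
    have ht' : t ∈ trips := (PySem.Set.mem_ofList trips t).mp ht
    obtain ⟨f, l, c⟩ := t
    have h1 : (l, c) ∈ lnames.zip courses := (List.of_mem_zip ht').2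
    exact (PySem.Set.mem_ofList courses c).mpr (List.of_mem_zip h1).2
  have hkeys0 : d0.keys = PySem.Set.ofList courses := by
    have h := PySem.Dict.keys_foldl_insert courses (fun _ _ => (0 : Int))
      (PySem.Dict.empty : PySem.Dict String Int)
    simpa [PySem.Dict.empty] using h
  have hkeys : dA.keys = PySem.Set.ofList courses := by
    have h := PySem.Dict.keys_foldl_modify_key uniq (fun t => t.2.2) (0 : Int)
      (fun _ _ => (fun v => v + 1)) d0
    rw [hdA]
    simp only [h, hkeys0]
    exact set_update_self _ _ hmem
  -- per-course printed values agree
  have h0 : ∀ c : String, d0.getD c 0 = 0 := fun c => by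
    rw [hd0]; exact getD_foldl_insert_zero courses PySem.Dict.empty c rfl
  have hval : ∀ c : String, dA.getD c 0
      = ((PySem.Set.ofList
          ((trips.filter (fun t => t.2.2 == c)).map (fun t => (t.1, t.2.1)))).length : Int) := by
    intro c
    rw [hdA, getD_modify_keyed, h0 c, zero_add, huniq]
    exact_mod_cast count_eq_len c trips
  -- assemble the output strings
  rw [hkeys]
  set keys := PySem.List.sorted (PySem.Set.ofList courses) (fun x => x) false with hks
  simp only [PySem.List.foldl_append_singleton_eq_map]
  have hbody : keys.foldl
      (fun out course => out ++ course ++ " " ++ PySem.Int.toStr (dA.getD course 0) ++ "\n") ""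
      = keys.foldl
      (fun out course => out ++ (course ++ " " ++ PySem.Int.toStr (dA.getD course 0) ++ "\n")) "" := by
    refine List.foldl_ext _ _ _ (fun a b _ => ?_)
    apply String.ext; simp
  rw [hbody, foldl_append_eq_join]
  have hfun : (fun course => course ++ " " ++ PySem.Int.toStr (dA.getD course 0) ++ "\n")
      = (fun course => course ++ " " ++
          PySem.Int.toStr ((PySem.Set.ofList
            ((trips.filter (fun t => t.2.2 == course)).map (fun t => (t.1, t.2.1)))).length : Int)
          ++ "\n") := by
    funext c; rw [hval]
  rw [hfun]
  apply String.ext; simp
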